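-- pv_equiv track=rewrite | github.com/JoshuaDueck/advent-of-code-2020 | day6/aoc_2020_day6_part1.py | count_unique_chars
-- ===== SOURCE A (Python) =====
-- def count_unique_chars(group_string):
--     chars = {}
--     count = 0
--     for char in group_string:
--         if char not in chars:
--             chars[char] = True
--             count += 1
--
--     return count
-- ===== SOURCE B (Python) =====
-- def count_unique_chars(group_string):
--     ordered = sorted(group_string)
--     count = 0
--     prev = None
--     for char in ordered:
--         if prev is None or char != prev:
--             count += 1
--         prev = char
--     return count
-- ===== Notes on version B (the rewrite author's own statement) =====
-- stated objective: alternative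
-- what changed: B sorts the characters and counts boundaries between adjacent unequal characters in one scan with only a previous-char variable, instead of A's seen-dictionary with membership tests.
import Mathlib
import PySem

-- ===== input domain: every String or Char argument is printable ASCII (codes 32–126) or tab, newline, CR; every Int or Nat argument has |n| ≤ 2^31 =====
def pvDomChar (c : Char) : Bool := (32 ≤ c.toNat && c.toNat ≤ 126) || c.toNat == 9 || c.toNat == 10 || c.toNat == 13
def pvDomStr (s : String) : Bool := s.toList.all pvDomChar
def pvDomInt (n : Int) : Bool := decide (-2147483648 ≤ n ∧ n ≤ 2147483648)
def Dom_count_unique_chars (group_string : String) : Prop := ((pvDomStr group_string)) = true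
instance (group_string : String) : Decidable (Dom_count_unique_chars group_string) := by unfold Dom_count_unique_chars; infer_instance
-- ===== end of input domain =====

-- B replaces A's seen-dictionary by sort-then-scan (count adjacent boundaries); alternative algorithm, not claimed faster.

-- ===== PORT A =====
def count_unique_chars (group_string : String) : Int :=
  (group_string.toList.foldl
    (fun (st : PySem.Dict Char Bool × Int) char =>
      if st.1.contains char = false then (st.1.insert char true, st.2 + 1) else st)
    (PySem.Dict.empty, 0)).2

-- ===== PORT B =====
-- B's loop body: 'if prev is None or char != prev: count += 1; prev = char'
def pvBstep (st : Int × Option Char) (char : Char) : Int × Option Char :=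
  ((if st.2 == none || st.2 != some char then st.1 + 1 else st.1), some char)

def count_unique_chars_alt (group_string : String) : Int :=
  let ordered := PySem.List.sorted group_string.toList (fun c => c) false
  (ordered.foldl pvBstep (0, none)).1

-- ===== PRECONDITION & SPEC =====
def Spec_count_unique_chars (group_string : String) (out : Int) : Prop := out = count_unique_chars_alt group_string
instance (group_string : String) (out : Int) : Decidable (Spec_count_unique_chars group_string out) := by unfold Spec_count_unique_chars; infer_instance

-- ===== CLAIM (what is proved, stated in full; the proofs are below) =====
def Claim_equal_count_unique_chars : Prop := ∀ (group_string : String), Dom_count_unique_chars group_string → Spec_count_unique_chars group_string (count_unique_chars group_string)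

-- ===== LEMMAS AND PROOFS =====

theorem pvCardInsert (x : Char) (t : Finset Char) : (insert x t).card = (t.erase x).card + 1 := by
  have h : insert x t = insert x (t.erase x) := by
    ext y; by_cases hy : y = x <;> simp [hy]
  rw [h, Finset.card_insert_of_notMem (Finset.notMem_erase _ _)]

-- A's loop: the count rises by the number of distinct characters of l not already in the dict.
theorem pvA_loop (l : List Char) (d : PySem.Dict Char Bool) (c : Int) (S : Finset Char)
    (h : ∀ x, d.contains x = true ↔ x ∈ S) :
    (l.foldl
      (fun (st : PySem.Dict Char Bool × Int) char =>
        if st.1.contains char = false then (st.1.insert char true, st.2 + 1) else st)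
      (d, c)).2 = c + ((l.toFinset \ S).card : Int) := by
  induction l generalizing d c S with
  | nil => simp
  | cons x xs ih =>
    by_cases hx : x ∈ S
    · have hc : d.contains x = true := (h x).mpr hx
      simp only [List.foldl_cons]
      rw [if_neg (by simp [hc]), ih d c S h]
      congr 2
      rw [List.toFinset_cons, Finset.insert_sdiff_of_mem _ hx]
    · have hc : d.contains x = false := by
        cases hcc : d.contains x with
        | false => rfl
        | true => exact absurd ((h x).mp hcc) hx
      simp only [List.foldl_cons]
      rw [if_pos hc, ih (d.insert x true) (c + 1) (insert x S) ?_]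
      · have h1 : ((x :: xs).toFinset \ S).card = ((xs.toFinset \ S).erase x).card + 1 := by
          rw [List.toFinset_cons, Finset.insert_sdiff_of_notMem _ hx, pvCardInsert]
        have h2 : xs.toFinset \ insert x S = (xs.toFinset \ S).erase x := by
          ext y
          simp only [Finset.mem_sdiff, Finset.mem_erase, Finset.mem_insert]
          tauto
        rw [h2, h1]
        push_cast
        ring
      · intro y
        rw [PySem.Dict.contains_insert, Finset.mem_insert]
        constructor
        · intro hy
          rcases Bool.or_eq_true_iff.mp hy with hy | hy
          · exact Or.inl (by exact_mod_cast eq_of_beq hy)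
          · exact Or.inr ((h y).mp hy)
        · intro hy
          rcases hy with hy | hy
          · simp [hy]
          · simp [(h y).mpr hy]

-- B's scan over a sorted tail whose elements all dominate the previous character p.
theorem pvB_loop (m : List Char) (c : Int) (p : Char)
    (hs : m.Pairwise (· ≤ ·)) (hp : ∀ y ∈ m, p ≤ y) :
    (m.foldl pvBstep (c, some p)).1 = c + ((m.toFinset.erase p).card : Int) := by
  induction m generalizing c p with
  | nil => simp
  | cons x xs ih =>
    have hx : p ≤ x := hp x (by simp)
    have hxs : xs.Pairwise (· ≤ ·) := hs.tail
    have hxall : ∀ y ∈ xs, x ≤ y := fun y hy => (List.pairwise_cons.mp hs).1 y hy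
    by_cases hpx : p = x
    · subst hpx
      simp only [List.foldl_cons, pvBstep]
      rw [if_neg (by simp), ih c p hxs hxall]
      congr 2
      rw [List.toFinset_cons, Finset.erase_insert_eq_erase]
    · have hplt : p < x := lt_of_le_of_ne hx hpx
      have hpnot : p ∉ (x :: xs).toFinset := by
        simp only [List.toFinset_cons, Finset.mem_insert, List.mem_toFinset]
        rintro (h | h)
        · exact hpx h
        · exact absurd (lt_of_lt_of_le hplt (hxall p h)) (lt_irrefl p)
      simp only [List.foldl_cons, pvBstep]
      rw [if_pos (by simpa using hpx), ih (c + 1) x hxs hxall]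
      rw [Finset.erase_eq_of_notMem hpnot, List.toFinset_cons, pvCardInsert]
      push_cast
      ring

-- B's whole scan counts the distinct characters of a sorted list.
theorem pvB_top (m : List Char) (hs : m.Pairwise (· ≤ ·)) :
    (m.foldl pvBstep (0, none)).1 = (m.toFinset.card : Int) := by
  cases m with
  | nil => simp
  | cons x xs =>
    simp only [List.foldl_cons, pvBstep]
    rw [if_pos (by simp)]
    rw [pvB_loop xs (0 + 1) x hs.tail (fun y hy => (List.pairwise_cons.mp hs).1 y hy)]
    rw [List.toFinset_cons, pvCardInsert]
    push_cast
    ring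

-- ===== VERDICT (by name: the statement is the Claim_ definition above) =====
theorem count_unique_chars_spec : Claim_equal_count_unique_chars := by
  intro s _
  unfold Spec_count_unique_chars
  simp only [count_unique_chars, count_unique_chars_alt]
  rw [pvA_loop s.toList PySem.Dict.empty 0 (∅ : Finset Char)
    (by intro x; simp [PySem.Dict.contains_empty])]
  rw [pvB_top _ (PySem.List.sorted_pairwise s.toList (fun c => c)),
    List.toFinset_eq_of_perm _ _ (PySem.List.sorted_perm s.toList (fun c => c) false)]
  simp
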